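-- pv_equiv track=rewrite | github.com/mattbeck1/amides | normalization_exp.py | substitution_variations
-- ===== SOURCE A (Python) =====
-- def substitution_variations(prev_variants):
--     replace_map = {'-h':'--help', 'cmd':'cmd.exe'}
--     tokens = prev_variants[0]
--     variants = prev_variants
--     for i, t in enumerate(tokens):
--         temp_variants = variants.copy()
--         for substring in replace_map.keys():
--             if substring == t:
--                 for v in variants:
--                     temp = v.copy()
--                     temp[i] = replace_map[substring]
--                     temp_variants.append(temp)
--                 variants = temp_variants
--     return variants
-- ===== SOURCE B (Python) =====
-- def substitution_variations(prev_variants):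
--     tokens = prev_variants[0]
--     pairs = []
--     for i, t in enumerate(tokens):
--         if t == '-h':
--             pairs.append((i, '--help'))
--         elif t == 'cmd':
--             pairs.append((i, 'cmd.exe'))
--     result = []
--     for mask in range(1 << len(pairs)):
--         for base in prev_variants:
--             v = list(base)
--             m = mask
--             for i, r in pairs:
--                 if m & 1:
--                     v[i] = r
--                 m >>= 1
--             result.append(v)
--     return result
-- ===== Notes on version B (the rewrite author's own statement) =====
-- stated objective: alternative
-- what changed: B precomputes the list of (position, replacement) pairs once and then enumerates the 2^k substitution subsets directly as bitmasks (mask-major, base-minor), instead of A's repeated doubling of an accumulator list with nested copy loops per token; Pre_ excludes only the inputs where both raise IndexError (empty outer list, or a matched position beyond some variant's length).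
import Mathlib
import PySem

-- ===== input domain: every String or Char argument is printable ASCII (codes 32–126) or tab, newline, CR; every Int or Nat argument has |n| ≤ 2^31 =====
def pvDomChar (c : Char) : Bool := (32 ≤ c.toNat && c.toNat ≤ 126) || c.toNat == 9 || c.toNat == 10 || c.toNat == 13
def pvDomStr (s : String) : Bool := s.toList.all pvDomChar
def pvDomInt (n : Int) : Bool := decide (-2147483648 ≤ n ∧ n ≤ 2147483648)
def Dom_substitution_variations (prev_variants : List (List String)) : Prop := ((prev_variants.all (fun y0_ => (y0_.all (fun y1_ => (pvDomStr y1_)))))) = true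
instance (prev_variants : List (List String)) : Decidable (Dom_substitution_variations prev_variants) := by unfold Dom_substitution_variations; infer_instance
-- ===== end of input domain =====

-- B enumerates the 2^k substitution subsets as bitmasks over precomputed (position, replacement)
-- pairs instead of A's repeated list doubling; same values, no speed claim.

-- ===== PORT A =====
def svReplaceMap : PySem.Dict String String := PySem.Dict.ofList [("-h", "--help"), ("cmd", "cmd.exe")]

def substitution_variations (prev_variants : List (List String)) : List (List String) :=
  -- tokens = prev_variants[0]; Pre_ excludes the empty list, where Python raises IndexError
  let tokens := prev_variants.headD []
  (PySem.List.enumerate tokens).foldl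
    (fun variants it =>
      -- temp[i] = …: enumerate indices are ≥ 0, so .toNat is exact; Pre_ excludes out-of-range i
      ((svReplaceMap.keys).foldl
        (fun (st : List (List String) × List (List String)) substring =>
          if substring == it.2 then
            let tv := st.1 ++ st.2.map (fun v => v.set it.1.toNat (svReplaceMap.getD substring ""))
            (tv, tv)
          else st)
        (variants, variants)).2)
    prev_variants

-- ===== PORT B =====
def substitution_variations_alt (prev_variants : List (List String)) : List (List String) :=
  -- tokens = prev_variants[0]; Pre_ excludes the empty list, where Python raises IndexError
  let tokens := prev_variants.headD []
  let pairs := (PySem.List.enumerate tokens).foldl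
    (fun ps it =>
      if it.2 == "-h" then ps ++ [(it.1.toNat, "--help")]
      else if it.2 == "cmd" then ps ++ [(it.1.toNat, "cmd.exe")]
      else ps) []
  (List.range (1 <<< pairs.length)).foldl
    (fun result mask =>
      prev_variants.foldl
        (fun result base =>
          -- v[i] = r: pair indices are in range under Pre_
          let v := (pairs.foldl
            (fun (st : List String × Nat) pr =>
              (if st.2 &&& 1 == 1 then st.1.set pr.1 pr.2 else st.1, st.2 >>> 1))
            (base, mask)).1
          result ++ [v])
        result)
    []

-- ===== PRECONDITION & SPEC =====
-- Pre_ excludes exactly the inputs where Python A raises IndexError: the empty outer list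
-- (prev_variants[0]), and inputs where some matched token position is out of range for some variant.
def Pre_substitution_variations (prev_variants : List (List String)) : Prop :=
  prev_variants ≠ [] ∧
  ∀ i < (prev_variants.headD []).length,
    ((prev_variants.headD [])[i]! = "-h" ∨ (prev_variants.headD [])[i]! = "cmd") →
    ∀ v ∈ prev_variants, i < v.length
instance (prev_variants : List (List String)) : Decidable (Pre_substitution_variations prev_variants) := by
  unfold Pre_substitution_variations; infer_instance

def pvWitness_substitution_variations : List (List String) := [["cmd", "-h", "x"], ["a", "b", "c"]]

def Spec_substitution_variations (prev_variants : List (List String)) (out : List (List String)) : Prop := out = substitution_variations_alt prev_variants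
instance (prev_variants : List (List String)) (out : List (List String)) : Decidable (Spec_substitution_variations prev_variants out) := by unfold Spec_substitution_variations; infer_instance

-- ===== CLAIM (what is proved, stated in full; the proofs are below) =====
def Claim_equal_substitution_variations : Prop := ∀ (prev_variants : List (List String)), Dom_substitution_variations prev_variants → Pre_substitution_variations prev_variants → Spec_substitution_variations prev_variants (substitution_variations prev_variants)

-- ===== LEMMAS AND PROOFS =====

-- the doubling step of A, on (index, replacement) pairs
def svDbl (vs : List (List String)) (p : Nat × String) : List (List String) :=
  vs ++ vs.map (fun v => v.set p.1 p.2)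

-- A's per-token step, simplified
def svStep (variants : List (List String)) (it : Int × String) : List (List String) :=
  if it.2 == "-h" then svDbl variants (it.1.toNat, "--help")
  else if it.2 == "cmd" then svDbl variants (it.1.toNat, "cmd.exe")
  else variants

-- the pair(s) contributed by one enumerated token
def svG (it : Int × String) : List (Nat × String) :=
  if it.2 == "-h" then [(it.1.toNat, "--help")]
  else if it.2 == "cmd" then [(it.1.toNat, "cmd.exe")]
  else []

-- B's mask application
def svApply (pairs : List (Nat × String)) (mask : Nat) (b : List String) : List String :=
  (pairs.foldl
    (fun (st : List String × Nat) pr =>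
      (if st.2 &&& 1 == 1 then st.1.set pr.1 pr.2 else st.1, st.2 >>> 1))
    (b, mask)).1

lemma svStepA_eq (variants : List (List String)) (it : Int × String) :
    ((svReplaceMap.keys).foldl
      (fun (st : List (List String) × List (List String)) substring =>
        if substring == it.2 then
          let tv := st.1 ++ st.2.map (fun v => v.set it.1.toNat (svReplaceMap.getD substring ""))
          (tv, tv)
        else st)
      (variants, variants)).2 = svStep variants it := by
  have hk : svReplaceMap.keys = ["-h", "cmd"] := by decide
  have g1 : svReplaceMap.getD "-h" "" = "--help" := by decide
  have g2 : svReplaceMap.getD "cmd" "" = "cmd.exe" := by decide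
  by_cases h1 : it.2 = "-h"
  · simp_all [svStep, svDbl, List.foldl]
  · by_cases h2 : it.2 = "cmd"
    · simp_all [svStep, svDbl, List.foldl]
    · have n1 : ¬ ("-h" = it.2) := fun h => h1 h.symm
      have n2 : ¬ ("cmd" = it.2) := fun h => h2 h.symm
      simp [hk, svStep, List.foldl, n1, n2, h1, h2]

lemma svFold_svStep_eq (l : List (Int × String)) (init : List (List String)) :
    l.foldl svStep init = (l.flatMap svG).foldl svDbl init := by
  induction l generalizing init with
  | nil => rfl
  | cons it l ih =>
    have hstep : List.foldl svDbl init (svG it) = svStep init it := by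
      by_cases h1 : it.2 = "-h" <;> by_cases h2 : it.2 = "cmd" <;>
        simp_all [svG, svStep, List.foldl]
    simp [List.foldl_cons, List.flatMap_cons, List.foldl_append, ih, hstep]

lemma svFlatMap_range_two_mul {α : Type} (n : Nat) (f : Nat → List α) :
    (List.range (2 * n)).flatMap f
      = (List.range n).flatMap (fun m => f (2 * m) ++ f (2 * m + 1)) := by
  induction n with
  | zero => rfl
  | succ n ih =>
    have : 2 * (n + 1) = (2 * n + 1) + 1 := by omega
    rw [this, List.range_succ, List.range_succ, List.range_succ]
    simp [List.flatMap_append, ih]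

lemma svApply_even (ps : List (Nat × String)) (p : Nat × String) (m : Nat) (b : List String) :
    svApply (p :: ps) (2 * m) b = svApply ps m b := by
  have h2 : (2 * m) >>> 1 = m := by simp [Nat.shiftRight_one, Nat.mul_div_cancel_left _ (by omega : 0 < 2)]
  simp [svApply, List.foldl_cons, Nat.and_one_is_mod, Nat.mul_mod_right, h2]

lemma svApply_odd (ps : List (Nat × String)) (p : Nat × String) (m : Nat) (b : List String) :
    svApply (p :: ps) (2 * m + 1) b = svApply ps m (b.set p.1 p.2) := by
  have h2 : (2 * m + 1) >>> 1 = m := by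
    simp [Nat.shiftRight_one]; omega
  simp [svApply, List.foldl_cons, Nat.and_one_is_mod, h2]

lemma svFold_svDbl_eq_masks (ps : List (Nat × String)) (init : List (List String)) :
    ps.foldl svDbl init
      = (List.range (2 ^ ps.length)).flatMap (fun mask => init.map (svApply ps mask)) := by
  induction ps generalizing init with
  | nil =>
    have h : svApply ([] : List (Nat × String)) 0 = fun b => b := rfl
    simp [h]
  | cons p ps ih =>
    have hpow : 2 ^ (p :: ps).length = 2 * 2 ^ ps.length := by
      simp [List.length_cons, pow_succ]; ring
    rw [hpow, svFlatMap_range_two_mul]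
    have : (fun m => init.map (svApply (p :: ps) (2 * m)) ++ init.map (svApply (p :: ps) (2 * m + 1)))
        = fun m => (svDbl init p).map (svApply ps m) := by
      funext m
      have he : svApply (p :: ps) (2 * m) = svApply ps m := funext fun b => svApply_even ps p m b
      have ho : svApply (p :: ps) (2 * m + 1) = fun b => svApply ps m (b.set p.1 p.2) :=
        funext fun b => svApply_odd ps p m b
      rw [he, ho]
      simp only [svDbl, List.map_append, List.map_map]
      rfl
    simp only [this]
    rw [List.foldl_cons, ih]

lemma svA_eq (prev_variants : List (List String)) :
    substitution_variations prev_variants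
      = ((PySem.List.enumerate (prev_variants.headD [])).flatMap svG).foldl svDbl prev_variants := by
  unfold substitution_variations
  rw [← svFold_svStep_eq]
  exact PySem.List.foldl_congr_mem _ _ _ _ (fun acc it _ => svStepA_eq acc it)

lemma svB_eq (prev_variants : List (List String)) :
    substitution_variations_alt prev_variants
      = (List.range (2 ^ ((PySem.List.enumerate (prev_variants.headD [])).flatMap svG).length)).flatMap
          (fun mask => prev_variants.map
            (svApply ((PySem.List.enumerate (prev_variants.headD [])).flatMap svG) mask)) := by
  unfold substitution_variations_alt
  have hpairs : (PySem.List.enumerate (prev_variants.headD [])).foldl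
      (fun ps (it : Int × String) =>
        if it.2 == "-h" then ps ++ [(it.1.toNat, "--help")]
        else if it.2 == "cmd" then ps ++ [(it.1.toNat, "cmd.exe")]
        else ps) []
      = (PySem.List.enumerate (prev_variants.headD [])).flatMap svG := by
    have : (fun ps (it : Int × String) =>
        if it.2 == "-h" then ps ++ [(it.1.toNat, "--help")]
        else if it.2 == "cmd" then ps ++ [(it.1.toNat, "cmd.exe")]
        else ps) = fun ps it => ps ++ svG it := by
      funext ps it
      by_cases h1 : it.2 = "-h" <;> by_cases h2 : it.2 = "cmd" <;> simp_all [svG]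
    rw [this, PySem.List.foldl_append_eq_flatMap]
    simp
  simp only [hpairs]
  have hshift : (1 <<< ((PySem.List.enumerate (prev_variants.headD [])).flatMap svG).length)
      = 2 ^ ((PySem.List.enumerate (prev_variants.headD [])).flatMap svG).length := by
    simp [Nat.shiftLeft_eq]
  rw [hshift]
  have hinner : ∀ (result : List (List String)) (mask : Nat),
      prev_variants.foldl
        (fun result base =>
          result ++ [(((PySem.List.enumerate (prev_variants.headD [])).flatMap svG).foldl
            (fun (st : List String × Nat) pr =>
              (if st.2 &&& 1 == 1 then st.1.set pr.1 pr.2 else st.1, st.2 >>> 1))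
            (base, mask)).1]) result
      = result ++ prev_variants.map
          (svApply ((PySem.List.enumerate (prev_variants.headD [])).flatMap svG) mask) := by
    intro result mask
    exact PySem.List.foldl_append_singleton_eq_map ..
  calc (List.range (2 ^ ((PySem.List.enumerate (prev_variants.headD [])).flatMap svG).length)).foldl
        (fun result mask =>
          prev_variants.foldl
            (fun result base =>
              result ++ [(((PySem.List.enumerate (prev_variants.headD [])).flatMap svG).foldl
                (fun (st : List String × Nat) pr =>
                  (if st.2 &&& 1 == 1 then st.1.set pr.1 pr.2 else st.1, st.2 >>> 1))
                (base, mask)).1]) result) []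
      = (List.range (2 ^ ((PySem.List.enumerate (prev_variants.headD [])).flatMap svG).length)).foldl
        (fun result mask => result ++ prev_variants.map
          (svApply ((PySem.List.enumerate (prev_variants.headD [])).flatMap svG) mask)) [] := by
        exact PySem.List.foldl_congr_mem _ _ _ _ (fun acc mask _ => hinner acc mask)
    _ = _ := by
        rw [PySem.List.foldl_append_eq_flatMap]; simp

-- ===== VERDICT (by name: the statement is the Claim_ definition above) =====
theorem substitution_variations_spec : Claim_equal_substitution_variations := by
  intro prev_variants _ _
  unfold Spec_substitution_variations
  rw [svA_eq, svB_eq, svFold_svDbl_eq_masks]
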